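-- pv_equiv track=rewrite | github.com/swrookie/coding-practice | programmers/level0/외계어 사전/solution.py | solution
-- ===== SOURCE A (Python) =====
-- def solution(spell, dic):
--     answer = 2
--     spelled = "".join(sorted(spell))
--
--     for word in dic:
--         if spelled == "".join(sorted(word)):
--             answer = 1
--             break
--
--     # 정렬 불필요, set활용, -는 차집합
--     # spelled = set(spell)
--     # for word in dic:
--     #     if not spelled - set(word):
--     #         answer = 1
--     #         break
--
--     return answer
-- ===== SOURCE B (Python) =====
-- def _counting_sorted(s):
--     # counting sort over the ASCII range instead of a comparison sort
--     counts = [0] * 128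
--     for ch in s:
--         counts[ord(ch)] += 1
--     return "".join(chr(i) * counts[i] for i in range(128))
--
--
-- def solution(spell, dic):
--     spelled = "".join(sorted(spell))
--     for word in dic:
--         if _counting_sorted(word) == spelled:
--             return 1
--     return 2
-- ===== Notes on version B (the rewrite author's own statement) =====
-- stated objective: alternative
-- what changed: Each dictionary word is normalised by an ASCII counting sort (bucket counts expanded back in code order) and compared against the joined sorted spell, instead of normalising every word with a comparison sort; the loop returns early instead of mutating an answer flag.
import Mathlib
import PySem

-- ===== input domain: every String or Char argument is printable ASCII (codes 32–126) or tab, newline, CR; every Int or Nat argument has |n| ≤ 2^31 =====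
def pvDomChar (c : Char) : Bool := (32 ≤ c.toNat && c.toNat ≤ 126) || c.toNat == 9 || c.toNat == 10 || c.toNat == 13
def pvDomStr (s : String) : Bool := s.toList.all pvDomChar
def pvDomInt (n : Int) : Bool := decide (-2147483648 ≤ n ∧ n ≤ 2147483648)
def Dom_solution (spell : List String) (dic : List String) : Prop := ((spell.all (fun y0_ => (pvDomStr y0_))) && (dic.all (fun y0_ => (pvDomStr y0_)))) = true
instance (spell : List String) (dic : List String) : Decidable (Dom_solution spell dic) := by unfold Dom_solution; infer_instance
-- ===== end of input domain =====

-- B normalises each dictionary word with an ASCII counting sort (bucket counts expanded in code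
-- order) and returns early on the first match, instead of A's per-word comparison sort into a
-- mutated answer flag; same return value on the whole domain.


-- ===== PORT A =====
-- 'for word in dic: if spelled == "".join(sorted(word)): answer = 1; break' — the loop over dic
-- with the answer accumulator (2 until the break sets it to 1).
def solutionGo (spelled : String) (dic : List String) (answer : Int) : Int :=
  match dic with
  | [] => answer
  | w :: rest =>
      -- '"".join(sorted(word))': sorting word's one-char strings and joining = the sorted char list
      if spelled == String.ofList (PySem.List.sorted w.toList (fun c => c)) then 1
      else solutionGo spelled rest answer

def solution (spell : List String) (dic : List String) : Int :=
  let spelled := PySem.Str.join "" (PySem.List.sorted spell (fun s => s))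
  solutionGo spelled dic 2

-- ===== PORT B =====
-- _counting_sorted: bucket counts over ASCII codes 0..127, expanded back in code order
def pvBump (cs : List Nat) (c : Char) : List Nat := cs.set c.toNat (cs.getD c.toNat 0 + 1)

def countingSorted (s : String) : String :=
  String.ofList ((List.range 128).flatMap (fun i =>
    List.replicate ((s.toList.foldl pvBump (List.replicate 128 0)).getD i 0) (Char.ofNat i)))

def solutionAltGo (spelled : String) (dic : List String) : Int :=
  match dic with
  | [] => 2
  | w :: rest => if countingSorted w == spelled then 1 else solutionAltGo spelled rest

def solution_alt (spell : List String) (dic : List String) : Int :=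
  let spelled := PySem.Str.join "" (PySem.List.sorted spell (fun s => s))
  solutionAltGo spelled dic

-- ===== PRECONDITION & SPEC =====
def Spec_solution (spell : List String) (dic : List String) (out : Int) : Prop := out = solution_alt spell dic
instance (spell : List String) (dic : List String) (out : Int) : Decidable (Spec_solution spell dic out) := by unfold Spec_solution; infer_instance

-- ===== CLAIM (what is proved, stated in full; the proofs are below) =====
def Claim_equal_solution : Prop := ∀ (spell : List String) (dic : List String), Dom_solution spell dic → Spec_solution spell dic (solution spell dic)

-- ===== LEMMAS AND PROOFS =====
theorem char_eq_of_toNat_eq {a b : Char} (h : a.toNat = b.toNat) : a = b :=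
  Char.ext (UInt32.toNat_inj.mp h)

theorem char_le_iff (a b : Char) : a ≤ b ↔ a.toNat ≤ b.toNat := by
  rw [Char.le_def, UInt32.le_iff_toNat_le]; exact Iff.rfl

theorem toNat_ofNat_lt {i : Nat} (hi : i < 128) : (Char.ofNat i).toNat = i := by
  rw [Char.toNat_ofNat, if_pos]
  exact Or.inl (by omega)

-- the bucket counts: entry i counts the characters with code i
theorem counts_getD (cs : List Char) (base : List Nat) (i : Nat)
    (hb : base.length = 128) (hi : i < 128) (hcs : ∀ c ∈ cs, c.toNat < 128) :
    (cs.foldl pvBump base).getD i 0 = base.getD i 0 + cs.countP (fun c => c.toNat == i) := by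
  induction cs generalizing base with
  | nil => simp
  | cons c rest ih =>
      have hc : c.toNat < 128 := hcs c (by simp)
      have hlt : c.toNat < base.length := by omega
      have hset : (pvBump base c).getD i 0 =
          if c.toNat = i then base.getD i 0 + 1 else base.getD i 0 := by
        simp only [pvBump, List.getD, List.getElem?_set, hlt, if_pos]
        split <;> simp_all
      rw [List.foldl_cons, ih (pvBump base c) (by simp [pvBump, hb])
        (fun d hd => hcs d (by simp [hd]))]
      rw [hset, List.countP_cons]
      by_cases h : c.toNat = i <;> simp [h] <;> try omega

theorem countP_eq_count (cs : List Char) (a : Char) :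
    cs.countP (fun c => c.toNat == a.toNat) = cs.count a := by
  unfold List.count
  apply List.countP_congr
  intro c _
  simp only [beq_iff_eq]
  constructor
  · exact fun h => char_eq_of_toNat_eq h
  · intro h; rw [h]

-- counting a character in the expanded buckets
theorem count_expansion (f : Nat → Nat) (n : Nat) (hn : n ≤ 128) (a : Char) :
    ((List.range n).flatMap (fun i => List.replicate (f i) (Char.ofNat i))).count a =
      if a.toNat < n then f a.toNat else 0 := by
  induction n with
  | zero => simp
  | succ m ih =>
      rw [List.range_succ, List.flatMap_append]
      rw [List.count_append, ih (by omega)]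
      simp only [List.flatMap_cons, List.flatMap_nil, List.append_nil, List.count_replicate]
      by_cases hm : a.toNat < m
      · have : ¬ (Char.ofNat m == a) = true := by
          simp only [beq_iff_eq]
          intro h
          have := toNat_ofNat_lt (show m < 128 by omega)
          rw [h] at this; omega
        simp [hm, this, show a.toNat < m + 1 by omega]
      · by_cases he : a.toNat = m
        · have : (Char.ofNat m == a) = true := by
            simp only [beq_iff_eq]
            exact char_eq_of_toNat_eq (by rw [toNat_ofNat_lt (show m < 128 by omega), he])
          simp [this, he]
        · have : ¬ (Char.ofNat m == a) = true := by
            simp only [beq_iff_eq]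
            intro h
            have := toNat_ofNat_lt (show m < 128 by omega)
            rw [h] at this; omega
          simp [hm, this, show ¬ a.toNat < m + 1 by omega]

-- the expanded buckets are in nondecreasing character order
theorem pairwise_expansion (f : Nat → Nat) (n : Nat) (hn : n ≤ 128) :
    ((List.range n).flatMap (fun i => List.replicate (f i) (Char.ofNat i))).Pairwise (· ≤ ·) := by
  induction n with
  | zero => simp
  | succ m ih =>
      rw [List.range_succ, List.flatMap_append]
      rw [List.pairwise_append]
      refine ⟨ih (by omega), ?_, ?_⟩
      · simp only [List.flatMap_cons, List.flatMap_nil, List.append_nil]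
        exact List.pairwise_replicate.mpr (Or.inr le_rfl)
      · intro x hx y hy
        simp only [List.mem_flatMap, List.mem_range, List.mem_replicate] at hx
        simp only [List.flatMap_cons, List.flatMap_nil, List.append_nil, List.mem_replicate] at hy
        obtain ⟨i, hi, _, hxe⟩ := hx
        rw [hxe, hy.2, char_le_iff, toNat_ofNat_lt (show i < 128 by omega),
          toNat_ofNat_lt (show m < 128 by omega)]
        omega

-- counting sort agrees with the comparison sort on ASCII strings
theorem countingSorted_eq (w : String) (h : ∀ c ∈ w.toList, c.toNat < 128) :
    countingSorted w = String.ofList (PySem.List.sorted w.toList (fun c => c)) := by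
  unfold countingSorted
  congr 1
  refine (PySem.List.sorted_id_eq_of_perm_of_pairwise _ _ ?_ ?_).symm
  · rw [List.perm_iff_count]
    intro a
    rw [count_expansion _ 128 le_rfl a]
    by_cases ha : a.toNat < 128
    · rw [if_pos ha,
        counts_getD w.toList (List.replicate 128 0) a.toNat (by simp) ha h,
        countP_eq_count]
      rw [List.getD_replicate (h := ha), Nat.zero_add]
    · rw [if_neg ha]
      symm
      rw [List.count_eq_zero]
      intro hm
      exact ha (h a hm)
  · exact pairwise_expansion _ 128 le_rfl

theorem beq_symm (a b : String) : (a == b) = (b == a) := by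
  exact Bool.eq_iff_iff.mpr (by simp only [beq_iff_eq]; exact eq_comm)

theorem go_eq (dic : List String) (spelled : String)
    (h : ∀ w ∈ dic, ∀ c ∈ w.toList, c.toNat < 128) :
    solutionGo spelled dic 2 = solutionAltGo spelled dic := by
  induction dic with
  | nil => rfl
  | cons w rest ih =>
      unfold solutionGo solutionAltGo
      rw [countingSorted_eq w (h w (by simp)), beq_symm]
      split
      · rfl
      · exact ih (fun v hv => h v (by simp [hv]))

theorem dom_char_lt {s : String} (hs : pvDomStr s = true) :
    ∀ c ∈ s.toList, c.toNat < 128 := by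
  intro c hc
  have := (List.all_eq_true.mp hs) c hc
  simp only [pvDomChar, Bool.or_eq_true, Bool.and_eq_true, decide_eq_true_eq,
    beq_iff_eq] at this
  omega

-- ===== VERDICT (by name: the statement is the Claim_ definition above) =====
theorem solution_spec : Claim_equal_solution := by
  intro spell dic hdom
  unfold Spec_solution solution solution_alt
  simp only [Dom_solution, Bool.and_eq_true, List.all_eq_true] at hdom
  exact go_eq dic _ (fun w hw => dom_char_lt (hdom.2 w hw))
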